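-- pv_equiv track=rewrite | github.com/sulfun/destiny-book-generator | scrapers/numerology.py | karmic_debt_numbers
-- ===== SOURCE A (Python) =====
-- MASTER_NUMBERS = {11, 22, 33}
--
-- def karmic_debt_numbers(year, month, day):
--     """카르마 부채 수 확인 (13, 14, 16, 19)"""
--     karmic_debts = []
--
--     # 생일에서 확인
--     if day in [13, 14, 16, 19]:
--         karmic_debts.append(day)
--
--     # 생명수 계산 중간값 확인
--     total = sum(int(d) for d in str(year)) + month + day
--     while total > 9 and total not in MASTER_NUMBERS:
--         if total in [13, 14, 16, 19]:
--             karmic_debts.append(total)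
--         total = sum(int(d) for d in str(total))
--
--     return list(set(karmic_debts))
-- ===== SOURCE B (Python) =====
-- KARMIC = {13, 14, 16, 19}
-- MASTERS = {11, 22, 33}
--
--
-- def _digit_sum(n):
--     return sum(int(d) for d in str(n))
--
--
-- def _active(t):
--     return t > 9 and t not in MASTERS
--
--
-- def karmic_debt_numbers(year, month, day):
--     """Loop-free version: the reduction chain contains at most three values
--     that are still checkable (>9 and non-master) -- the initial total
--     (< 10**10 for 32-bit inputs), its digit sum (<= 90) and the next digit
--     sum (<= 18), after which the value is a single digit.  So the while-loop
--     is replaced by straight-line code examining exactly those three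
--     candidates."""
--     found = {day} & KARMIC
--     t0 = _digit_sum(year) + month + day
--     if _active(t0):
--         found |= {t0} & KARMIC
--         t1 = _digit_sum(t0)
--         if _active(t1):
--             found |= {t1} & KARMIC
--             t2 = _digit_sum(t1)
--             if _active(t2):
--                 found |= {t2} & KARMIC
--                 # _digit_sum(t2) <= 9 here: the chain has ended
--     return list(found)
-- ===== Notes on version B (the rewrite author's own statement) =====
-- stated objective: alternative
-- what changed: B eliminates A's while-loop entirely: a bound argument (the total is < 10^10 for 32-bit inputs, so its digit sum is <= 90, the next <= 18, and the next a single digit) shows the chain has at most three checkable values, so B is straight-line code examining exactly those three candidates.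
import Mathlib
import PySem

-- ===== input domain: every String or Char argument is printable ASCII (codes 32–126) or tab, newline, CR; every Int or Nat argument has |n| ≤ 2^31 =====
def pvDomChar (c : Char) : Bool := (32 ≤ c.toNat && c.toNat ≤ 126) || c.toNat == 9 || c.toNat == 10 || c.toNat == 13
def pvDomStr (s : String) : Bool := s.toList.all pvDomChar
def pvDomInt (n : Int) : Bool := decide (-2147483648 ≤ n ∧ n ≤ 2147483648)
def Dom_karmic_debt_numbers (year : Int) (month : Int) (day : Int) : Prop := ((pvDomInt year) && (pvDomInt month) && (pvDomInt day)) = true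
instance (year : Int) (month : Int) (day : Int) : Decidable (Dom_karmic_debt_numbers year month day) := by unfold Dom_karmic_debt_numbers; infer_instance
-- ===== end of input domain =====

-- B replaces A's while-loop by straight-line code: for 32-bit inputs the chain has at
-- most three checkable values, so B examines exactly those three (objective: alternative).

-- ---- shared helpers (identical code occurs in both Pythons) ----

-- int(d) for a single decimal-digit character d (d is always a digit here:
-- Pre_ excludes year < 0, the only input whose str() contains a non-digit,
-- and every looped total is > 9, hence positive)
def pvDval (c : Char) : Int := (c.toNat : Int) - 48

-- sum(int(d) for d in str(n)) ; exact for n ≥ 0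
def pvDigitsum (n : Int) : Int := ((PySem.Int.toChars n).map pvDval).sum

-- t > 9 and t not in MASTERS (B's helper _active; A's while-condition is the same test)
def pvActive (t : Int) : Bool := t > 9 && ! [(11:Int), 22, 33].contains t

-- list(set(xs)) for xs ⊆ {13,14,16,19}: CPython's set iterates its 8-slot hash
-- table in slot order (hash(v) = v, slot v % 8: 16→0, 19→3, 13→5, 14→6), so the
-- order is 16,19,13,14 regardless of insertion order; exact on this value universe.
def pvSetList4 (xs : List Int) : List Int := [16, 19, 13, 14].filter (fun v => xs.contains v)

-- termination fact for A's reduction loop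
def pvDsumN (n : Nat) : Nat :=
  if h : n < 10 then n else n % 10 + pvDsumN (n / 10)
  termination_by n
  decreasing_by exact Nat.div_lt_self (by omega) (by omega)

theorem pvDigitChar_toNat (d : Nat) (h : d < 10) : (Nat.digitChar d).toNat = d + 48 := by
  interval_cases d <;> decide

theorem pvCore_sum (f : Nat) : ∀ (n : Nat) (acc : List Char), n < f →
    ((Nat.toDigitsCore 10 f n acc).map pvDval).sum = (pvDsumN n : Int) + ((acc.map pvDval).sum) := by
  induction f with
  | zero => intro n acc h; omega
  | succ f ih =>
    intro n acc h
    rw [Nat.toDigitsCore]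
    by_cases h0 : n / 10 = 0
    · have hn : n < 10 := by omega
      have hmod : n % 10 = n := Nat.mod_eq_of_lt hn
      rw [if_pos h0, pvDsumN]
      simp only [hn, dif_pos]
      simp [pvDval, hmod]
      rw [pvDigitChar_toNat n hn]
      push_cast
      ring
    · have hlt : n / 10 < f := by
        have := Nat.div_lt_self (by omega : 0 < n) (by omega : 1 < 10)
        omega
      rw [if_neg h0]
      rw [ih (n / 10) _ hlt]
      have hn : ¬ n < 10 := by omega
      conv_rhs => rw [pvDsumN, dif_neg hn]
      simp [pvDval, pvDigitChar_toNat (n % 10) (Nat.mod_lt _ (by omega))]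
      ring

theorem pvDigitsum_eq (n : Int) (h : 0 ≤ n) : pvDigitsum n = (pvDsumN n.toNat : Int) := by
  unfold pvDigitsum PySem.Int.toChars
  rw [if_neg (by omega)]
  unfold Nat.toDigits
  rw [pvCore_sum (n.toNat + 1) n.toNat [] (by omega)]
  simp

theorem pvDsumN_lt (n : Nat) (h : 10 ≤ n) : pvDsumN n < n := by
  induction n using Nat.strong_induction_on with
  | _ n ih =>
    rw [pvDsumN]
    rw [dif_neg (by omega)]
    by_cases h2 : n / 10 < 10
    · rw [pvDsumN, dif_pos h2]
      omega
    · have := ih (n / 10) (Nat.div_lt_self (by omega) (by omega)) (by omega)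
      omega

theorem pvDigitsum_lt_of_gt9 (t : Int) (h : 9 < t) : (pvDigitsum t).toNat < t.toNat := by
  rw [pvDigitsum_eq t (by omega)]
  have h10 : 10 ≤ t.toNat := by omega
  have := pvDsumN_lt t.toNat h10
  omega

-- ===== PORT A =====
def pvLoopA (total : Int) (acc : List Int) : List Int :=
  if h : total > 9 ∧ ¬ ([(11:Int), 22, 33].contains total) then
    pvLoopA (pvDigitsum total)
      (if [(13:Int), 14, 16, 19].contains total then acc ++ [total] else acc)
  else acc
  termination_by total.toNat
  decreasing_by exact pvDigitsum_lt_of_gt9 total h.1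

def karmic_debt_numbers (year : Int) (month : Int) (day : Int) : List Int :=
  let karmic_debts : List Int := if [(13:Int), 14, 16, 19].contains day then [day] else []
  let total := pvDigitsum year + month + day
  pvSetList4 (pvLoopA total karmic_debts)

-- ===== PORT B =====
-- found |= {v} & KARMIC on the set `found` (sets over the universe {13,14,16,19};
-- modelled as the accumulated list, deduplicated by pvSetList4 = list(set ...))
def pvAddK (found : List Int) (v : Int) : List Int :=
  if [(13:Int), 14, 16, 19].contains v then found ++ [v] else found

def karmic_debt_numbers_alt (year : Int) (month : Int) (day : Int) : List Int :=
  let found := pvAddK [] day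
  let t0 := pvDigitsum year + month + day
  pvSetList4 <|
    if pvActive t0 then
      let found := pvAddK found t0
      let t1 := pvDigitsum t0
      if pvActive t1 then
        let found := pvAddK found t1
        let t2 := pvDigitsum t1
        if pvActive t2 then
          pvAddK found t2
        else found
      else found
    else found

-- ===== PRECONDITION & SPEC =====
-- A raises ValueError when year < 0 (int('-') on the sign character of str(year)); B raises there too.
def Pre_karmic_debt_numbers (year : Int) (month : Int) (day : Int) : Prop := 0 ≤ year
instance (year : Int) (month : Int) (day : Int) : Decidable (Pre_karmic_debt_numbers year month day) := by unfold Pre_karmic_debt_numbers; infer_instance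
def pvWitness_karmic_debt_numbers : Int × Int × Int := (1990, 7, 13)

def Spec_karmic_debt_numbers (year : Int) (month : Int) (day : Int) (out : List Int) : Prop := out = karmic_debt_numbers_alt year month day
instance (year : Int) (month : Int) (day : Int) (out : List Int) : Decidable (Spec_karmic_debt_numbers year month day out) := by unfold Spec_karmic_debt_numbers; infer_instance

-- ===== CLAIM (what is proved, stated in full; the proofs are below) =====
def Claim_equal_karmic_debt_numbers : Prop := ∀ (year : Int) (month : Int) (day : Int), Dom_karmic_debt_numbers year month day → Pre_karmic_debt_numbers year month day → Spec_karmic_debt_numbers year month day (karmic_debt_numbers year month day)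

-- ===== LEMMAS AND PROOFS =====

theorem pvDsumN_le (k : Nat) : ∀ n : Nat, n < 10 ^ k → pvDsumN n ≤ 9 * k := by
  induction k with
  | zero => intro n h; interval_cases n; simp [pvDsumN]
  | succ k ih =>
    intro n h
    by_cases hn : n < 10
    · rw [pvDsumN, dif_pos hn]; omega
    · rw [pvDsumN, dif_neg hn]
      have hdiv : n / 10 < 10 ^ k := by
        have : n < 10 * 10 ^ k := by rw [pow_succ] at h; omega
        omega
      have := ih (n / 10) hdiv
      have := Nat.mod_lt n (show 0 < 10 by omega)
      omega

theorem pvDigitsum_nonneg (n : Int) (h : 0 ≤ n) : 0 ≤ pvDigitsum n := by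
  rw [pvDigitsum_eq n h]; positivity

theorem pvDigitsum_le (n : Int) (k : Nat) (h0 : 0 ≤ n) (h : n < (10 : Int) ^ k) :
    pvDigitsum n ≤ 9 * k := by
  rw [pvDigitsum_eq n h0]
  have hn : n.toNat < 10 ^ k := by
    have : ((10 : Int) ^ k) = ((10 ^ k : Nat) : Int) := by push_cast; ring
    omega
  have := pvDsumN_le k n.toNat hn
  omega

theorem pvLoopA_stop (t : Int) (acc : List Int) (h : pvActive t = false) :
    pvLoopA t acc = acc := by
  rw [pvLoopA, dif_neg]
  simp only [pvActive, Bool.and_eq_false_iff] at h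
  rcases h with h | h
  · intro hc; exact absurd hc.1 (by simpa using h)
  · intro hc; exact absurd hc.2 (by simpa using h)

theorem pvLoopA_step (t : Int) (acc : List Int) (h : pvActive t = true) :
    pvLoopA t acc = pvLoopA (pvDigitsum t) (pvAddK acc t) := by
  simp only [pvActive, Bool.and_eq_true, decide_eq_true_eq, Bool.not_eq_true'] at h
  rw [pvLoopA, dif_pos ⟨h.1, by simpa using h.2⟩, pvAddK]

-- digit sums of the values 10..18 are single digits
theorem pvDigitsum_small (t : Int) (h1 : 10 ≤ t) (h2 : t ≤ 18) : pvDigitsum t ≤ 9 := by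
  interval_cases t <;> decide

-- ===== VERDICT (by name: the statement is the Claim_ definition above) =====
theorem karmic_debt_numbers_spec : Claim_equal_karmic_debt_numbers := by
  intro year month day hdom hpre
  unfold Spec_karmic_debt_numbers karmic_debt_numbers karmic_debt_numbers_alt
  dsimp only
  simp only [Dom_karmic_debt_numbers, Bool.and_eq_true, pvDomInt, decide_eq_true_eq] at hdom
  have hyear : year < (10 : Int) ^ 10 := by
    have := hdom.1.1.2; norm_num; omega
  have hdy : pvDigitsum year ≤ 90 := by
    have := pvDigitsum_le year 10 hpre hyear; omega
  have hdy0 : 0 ≤ pvDigitsum year := pvDigitsum_nonneg year hpre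
  set t0 := pvDigitsum year + month + day with ht0
  have hinit : pvLoopA t0 (if [(13:Int), 14, 16, 19].contains day then [day] else []) =
      pvLoopA t0 (pvAddK [] day) := by rw [pvAddK]; simp
  rw [hinit]
  cases h0 : pvActive t0 with
  | false => rw [pvLoopA_stop _ _ h0]; simp only [Bool.false_eq_true, if_false]
  | true =>
    have h0' : 9 < t0 := by
      simp only [pvActive, Bool.and_eq_true, decide_eq_true_eq] at h0; exact h0.1
    have ht0ub : t0 < (10 : Int) ^ 10 := by
      have hm := hdom.1.2; have hd := hdom.2
      norm_num; omega
    rw [pvLoopA_step _ _ h0]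
    set t1 := pvDigitsum t0 with ht1
    have ht1ub : t1 ≤ 90 := by
      have := pvDigitsum_le t0 10 (by omega) ht0ub; omega
    cases h1 : pvActive t1 with
    | false =>
      rw [pvLoopA_stop _ _ h1]
      simp only [Bool.false_eq_true, if_false, if_true]
    | true =>
      have h1' : 9 < t1 := by
        simp only [pvActive, Bool.and_eq_true, decide_eq_true_eq] at h1; exact h1.1
      rw [pvLoopA_step _ _ h1]
      set t2 := pvDigitsum t1 with ht2
      have ht2ub : t2 ≤ 18 := by
        have := pvDigitsum_le t1 2 (by omega) (by norm_num; omega); omega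
      cases h2 : pvActive t2 with
      | false =>
        rw [pvLoopA_stop _ _ h2]
        simp only [Bool.false_eq_true, if_false, if_true]
      | true =>
        have h2' : 9 < t2 := by
          simp only [pvActive, Bool.and_eq_true, decide_eq_true_eq] at h2; exact h2.1
        rw [pvLoopA_step _ _ h2]
        have hfin : pvActive (pvDigitsum t2) = false := by
          have := pvDigitsum_small t2 (by omega) ht2ub
          simp only [pvActive, Bool.and_eq_false_iff]
          left
          simpa using (by omega : ¬ 9 < pvDigitsum t2)
        rw [pvLoopA_stop _ _ hfin]
        simp only [if_true]
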